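-- pv_equiv track=rewrite | github.com/brianfilliat/VSCode-Python-2026 | array_algorithms_challenge.py | largest_peak_distance
-- ===== SOURCE A (Python) =====
-- def largest_peak_distance(arr: list[int]) -> int:
--     if len(arr) < 3:
--         return 0
--
--     peaks = []
--     for i in range(1, len(arr) - 1):
--         if arr[i] > arr[i-1] and arr[i] > arr[i+1]:
--             peaks.append(i)
--
--     if len(peaks) < 2:
--         return 0
--
--     max_distance = 0
--     for i in range(1, len(peaks)):
--         distance = peaks[i] - peaks[i-1]
--         if distance > max_distance:
--             max_distance = distance
--
--     return max_distance
-- ===== SOURCE B (Python) =====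
-- def largest_peak_distance(arr: list[int]) -> int:
--     max_distance = 0
--     prev_peak = None
--     for i in range(1, len(arr) - 1):
--         if arr[i] > arr[i-1] and arr[i] > arr[i+1]:
--             if prev_peak is not None and i - prev_peak > max_distance:
--                 max_distance = i - prev_peak
--             prev_peak = i
--     return max_distance
-- ===== Notes on version B (the rewrite author's own statement) =====
-- stated objective: simpler
-- what changed: single pass keeping only the previous peak index and the running maximum gap, instead of materialising the full peaks list and scanning it a second time by index
import Mathlib
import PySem

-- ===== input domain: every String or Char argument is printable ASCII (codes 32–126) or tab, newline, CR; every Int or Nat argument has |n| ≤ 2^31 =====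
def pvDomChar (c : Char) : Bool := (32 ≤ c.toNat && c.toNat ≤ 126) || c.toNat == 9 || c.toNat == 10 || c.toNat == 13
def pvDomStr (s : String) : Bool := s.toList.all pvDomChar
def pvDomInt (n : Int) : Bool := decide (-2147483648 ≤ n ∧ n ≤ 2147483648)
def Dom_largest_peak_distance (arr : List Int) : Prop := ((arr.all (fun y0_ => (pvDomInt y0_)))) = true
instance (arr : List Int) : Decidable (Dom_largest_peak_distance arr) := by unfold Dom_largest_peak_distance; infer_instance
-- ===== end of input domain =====

-- B replaces A's build-peaks-list-then-rescan with a single pass keeping only the previous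
-- peak index and the running maximum gap (objective: simpler, O(1) extra space).


-- ===== PORT A =====
-- 'arr[i] > arr[i-1] and arr[i] > arr[i+1]' — indices i-1, i, i+1 always in range on
-- 1 ≤ i ≤ len-2, so pyGetD (total indexing) is exact here; shared by both ports verbatim.
def pvIsPeak (arr : List Int) (i : Int) : Bool :=
  (PySem.List.pyGetD arr i 0 > PySem.List.pyGetD arr (i-1) 0) &&
  (PySem.List.pyGetD arr i 0 > PySem.List.pyGetD arr (i+1) 0)

def largest_peak_distance (arr : List Int) : Int :=
  if (arr.length : Int) < 3 then 0
  else
    let peaks : List Int :=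
      (PySem.List.pyRange 1 ((arr.length : Int) - 1) 1).foldl
        (fun acc i => if pvIsPeak arr i then acc ++ [i] else acc) []
    if (peaks.length : Int) < 2 then 0
    else
      (PySem.List.pyRange 1 (peaks.length : Int) 1).foldl
        (fun max_distance i =>
          let distance := PySem.List.pyGetD peaks i 0 - PySem.List.pyGetD peaks (i-1) 0
          if distance > max_distance then distance else max_distance) 0

-- ===== PORT B =====
def largest_peak_distance_alt (arr : List Int) : Int :=
  ((PySem.List.pyRange 1 ((arr.length : Int) - 1) 1).foldl
    (fun (st : Option Int × Int) i =>
      if pvIsPeak arr i then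
        match st.1 with
        | some p => (some i, if i - p > st.2 then i - p else st.2)
        | none   => (some i, st.2)
      else st) (none, 0)).2

-- ===== PRECONDITION & SPEC =====
def Spec_largest_peak_distance (arr : List Int) (out : Int) : Prop := out = largest_peak_distance_alt arr
instance (arr : List Int) (out : Int) : Decidable (Spec_largest_peak_distance arr out) := by unfold Spec_largest_peak_distance; infer_instance

-- ===== CLAIM (what is proved, stated in full; the proofs are below) =====
def Claim_equal_largest_peak_distance : Prop := ∀ (arr : List Int), Dom_largest_peak_distance arr → Spec_largest_peak_distance arr (largest_peak_distance arr)

-- ===== LEMMAS AND PROOFS =====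

-- B's loop body, run over the list of peak indices only.
def pvRunB (st : Option Int × Int) : List Int → Option Int × Int
  | [] => st
  | q :: qs =>
      pvRunB (match st.1 with
              | some p => (some q, if q - p > st.2 then q - p else st.2)
              | none   => (some q, st.2)) qs

-- A's second loop, expressed structurally on the peaks list.
def pvGapMax (p m : Int) : List Int → Int
  | [] => m
  | q :: qs => pvGapMax q (if q - p > m then q - p else m) qs

lemma pvRunB_some (qs : List Int) : ∀ p m,
    pvRunB (some p, m) qs = (some (qs.getLastD p), pvGapMax p m qs) := by
  induction qs with
  | nil => intro p m; simp [pvRunB, pvGapMax]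
  | cons q qs ih =>
      intro p m
      simp only [pvRunB, pvGapMax, ih]
      rw [List.getLastD_cons]

lemma pvFoldB_runB (arr : List Int) (l : List Int) : ∀ st,
    l.foldl (fun (st : Option Int × Int) i =>
      if pvIsPeak arr i then
        match st.1 with
        | some p => (some i, if i - p > st.2 then i - p else st.2)
        | none   => (some i, st.2)
      else st) st
    = pvRunB st (l.filter (pvIsPeak arr)) := by
  induction l with
  | nil => intro st; simp [pvRunB]
  | cons x l ih =>
      intro st
      by_cases h : pvIsPeak arr x = true
      · simp [List.foldl_cons, h, ih, pvRunB]
      · simp [List.foldl_cons, h, ih]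

-- A's second loop by index equals pvGapMax on the tail, for every window of the peaks list.
lemma pvSecondLoop_window (ps : List Int) : ∀ (j k : Nat) (m : Int),
    ps.length = k + 1 + j →
    (PySem.List.pyRange ((k : Int) + 1) (ps.length : Int) 1).foldl
      (fun max_distance i =>
        let distance := PySem.List.pyGetD ps i 0 - PySem.List.pyGetD ps (i-1) 0
        if distance > max_distance then distance else max_distance) m
    = pvGapMax (ps.getD k 0) m (ps.drop (k + 1)) := by
  intro j
  induction j with
  | zero =>
      intro k m hlen
      rw [PySem.List.pyRange_one_eq_nil (by omega)]
      rw [List.drop_eq_nil_of_le (by omega)]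
      simp [pvGapMax]
  | succ j ih =>
      intro k m hlen
      rw [PySem.List.pyRange_one_cons (by push_cast; omega)]
      rw [List.foldl_cons]
      have h1 : ((k : Int) + 1) = ((k + 1 : Nat) : Int) := by push_cast; ring
      have h2 : ((k : Int) + 1 - 1) = ((k : Nat) : Int) := by push_cast; ring
      have hk1 : k + 1 < ps.length := by omega
      have hk : k < ps.length := by omega
      have hd : ps.drop (k + 1) = ps[k + 1] :: ps.drop (k + 2) := by
        rw [List.drop_eq_getElem_cons hk1]
      rw [h1]
      have h2' : ((k + 1 : Nat) : Int) - 1 = ((k : Nat) : Int) := by push_cast; ring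
      rw [h2', PySem.List.pyGetD_natCast, PySem.List.pyGetD_natCast]
      have := ih (k + 1) (if (ps.getD (k+1) 0 - ps.getD k 0) > m then (ps.getD (k+1) 0 - ps.getD k 0) else m) (by omega)
      rw [hd]
      simp only [pvGapMax]
      rw [List.getD_eq_getElem ps 0 hk1] at this ⊢
      exact this

lemma pvSecondLoop (p : Int) (qs : List Int) :
    (PySem.List.pyRange 1 (((p :: qs).length : Int)) 1).foldl
      (fun max_distance i =>
        let distance := PySem.List.pyGetD (p :: qs) i 0 - PySem.List.pyGetD (p :: qs) (i-1) 0
        if distance > max_distance then distance else max_distance) 0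
    = pvGapMax p 0 qs := by
  have := pvSecondLoop_window (p :: qs) qs.length 0 0 (by simp [Nat.add_comm])
  simpa using this

-- ===== VERDICT (by name: the statement is the Claim_ definition above) =====
theorem largest_peak_distance_spec : Claim_equal_largest_peak_distance := by
  intro arr _
  unfold Spec_largest_peak_distance largest_peak_distance largest_peak_distance_alt
  rw [pvFoldB_runB]
  rw [PySem.List.foldl_append_if_eq_filter]
  set l := (PySem.List.pyRange 1 ((arr.length : Int) - 1) 1).filter (pvIsPeak arr) with hl
  by_cases h3 : (arr.length : Int) < 3
  · have : PySem.List.pyRange 1 ((arr.length : Int) - 1) 1 = [] :=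
      PySem.List.pyRange_one_eq_nil (by omega)
    simp [h3, hl, this, pvRunB]
  · simp only [h3, if_false, List.nil_append]
    match hm : l with
    | [] => simp [pvRunB]
    | [p] => simp [pvRunB]
    | p :: q :: qs =>
        have hlen : ¬ (((p :: q :: qs).length : Int) < 2) := by simp
        simp only [hlen, if_false]
        rw [pvSecondLoop]
        simp [pvRunB, pvRunB_some, pvGapMax]
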